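-- pv_equiv track=rewrite | github.com/Alok1721/CompetitiveCoding_DSA | OA/wells_fargo/virus.py | findVirus
-- ===== SOURCE A (Python) =====
-- def findVirus(n,arr):
--     while len(arr)!=1:
--         sum=0
--         for i in range(len(arr)):
--             sum+=arr[i]
--         groupValue=sum//2
--         nearestIndex=0
--         for i in range(len(arr)):
--             if abs(arr[i]-groupValue)-abs(arr[nearestIndex]-groupValue)<0:
--                 nearestIndex=i
--         arr.pop(nearestIndex)
--     return arr[0]
-- ===== SOURCE B (Python) =====
-- def _bisect(sl, v):
--     # first index j with sl[j][0] >= v (hand-rolled bisect_left on the value component)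
--     lo, hi = 0, len(sl)
--     while lo < hi:
--         mid = (lo + hi) // 2
--         if sl[mid][0] < v:
--             lo = mid + 1
--         else:
--             hi = mid
--     return lo
--
--
-- def _pick(sl, g):
--     # index in sl of the pair (value, position) with value nearest g,
--     # ties (equal |value-g|) broken by smallest position
--     j = _bisect(sl, g)
--     if j == 0:
--         return j
--     if j == len(sl):
--         return _bisect(sl, sl[j - 1][0])
--     k2 = _bisect(sl, sl[j - 1][0])
--     dlo = g - sl[k2][0]
--     dhi = sl[j][0] - g
--     if dlo < dhi or (dlo == dhi and sl[k2][1] < sl[j][1]):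
--         return k2
--     return j
--
--
-- def findVirus(n, arr):
--     # Return-value equivalent to A; unlike A, does not mutate the caller's list.
--     # Keeps (value, original position) pairs sorted by value (stable sort makes
--     # positions ascending among equal values); each round finds the value nearest
--     # to half of the running sum by binary search instead of rescanning the list.
--     sl = sorted(((v, p) for p, v in enumerate(arr)), key=lambda q: q[0])
--     total = sum(arr)
--     while len(sl) > 1:
--         g = total // 2
--         k = _pick(sl, g)
--         total -= sl[k][0]
--         del sl[k]
--     return sl[0][0]
-- ===== Notes on version B (the rewrite author's own statement) =====
-- stated objective: faster
-- what changed: Instead of re-summing the list and linearly scanning for the nearest element every round, B keeps a running sum and a list of (value, original position) pairs sorted by value, finding the element nearest to half the sum by binary search (position component reproduces A's first-index tie-break); removal is a single delete from the sorted list.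
import Mathlib
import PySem

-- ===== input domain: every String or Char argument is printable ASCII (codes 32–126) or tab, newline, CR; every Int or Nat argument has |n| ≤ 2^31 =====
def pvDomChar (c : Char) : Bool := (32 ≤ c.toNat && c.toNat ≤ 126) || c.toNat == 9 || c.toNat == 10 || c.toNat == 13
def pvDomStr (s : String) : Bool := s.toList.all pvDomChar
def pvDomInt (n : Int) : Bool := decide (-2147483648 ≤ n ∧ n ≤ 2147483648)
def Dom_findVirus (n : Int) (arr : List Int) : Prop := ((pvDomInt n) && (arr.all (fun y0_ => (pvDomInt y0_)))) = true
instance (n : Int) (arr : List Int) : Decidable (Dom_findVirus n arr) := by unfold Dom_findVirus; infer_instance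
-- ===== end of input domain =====

-- B replaces A's per-round re-summation and linear nearest-scan by a running sum plus a
-- value-sorted list of (value, original position) pairs queried by binary search (faster;
-- A mutates its list argument in place, B does not — the equivalence is about the return value).


-- ===== PORT A =====
-- while len(arr)!=1: sum the list, groupValue = sum//2, take the first index of
-- smallest |arr[i]-groupValue|, pop it; returns the final one-element list.
def findVirusLoop (arr : List Int) : List Int :=
  if arr.length ≠ 1 then
    let s := (PySem.List.pyRange 0 arr.length 1).foldl
      (fun acc i => acc + PySem.List.pyGetD arr i 0) 0
    let g := PySem.Int.floordiv s 2
    let ni := (PySem.List.pyRange 0 arr.length 1).foldl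
      (fun ni i =>
        if |PySem.List.pyGetD arr i 0 - g| - |PySem.List.pyGetD arr ni 0 - g| < 0 then i else ni) 0
    match h : PySem.List.pop? arr ni with   -- arr.pop(nearestIndex); none = IndexError (empty arr, outside Pre_)
    | some r => findVirusLoop r.2
    | none => arr
  else arr
termination_by arr.length
decreasing_by
  have := PySem.List.length_of_pop?_eq_some arr h
  omega

def findVirus (n : Int) (arr : List Int) : Int :=
  PySem.List.pyGetD (findVirusLoop arr) 0 0   -- arr[0]; in range whenever arr ≠ [] (Pre_)

-- ===== PORT B =====
-- _bisect(sl, v): binary search for the first index with value component ≥ v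
def bisectLoop (sl : List (Int × Int)) (v : Int) (lo hi : Int) : Int :=
  if hlt : lo < hi then
    let mid := PySem.Int.floordiv (lo + hi) 2
    if (PySem.List.pyGetD sl mid (0, 0)).1 < v then bisectLoop sl v (mid + 1) hi
    else bisectLoop sl v lo mid
  else lo
termination_by (hi - lo).toNat
decreasing_by
  · have h1 := PySem.Int.floordiv_two_mid_bounds (le_of_lt hlt)
    have h2 : PySem.Int.floordiv (lo + hi) 2 < hi :=
      (PySem.Int.floordiv_lt_iff_lt_mul (by omega)).2 (by omega)
    omega
  · have h1 := PySem.Int.floordiv_two_mid_bounds (le_of_lt hlt)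
    have h2 : lo ≤ PySem.Int.floordiv (lo + hi) 2 := h1.1
    have h3 : PySem.Int.floordiv (lo + hi) 2 < hi :=
      (PySem.Int.floordiv_lt_iff_lt_mul (by omega)).2 (by omega)
    omega

def bisectVal (sl : List (Int × Int)) (v : Int) : Int :=
  bisectLoop sl v 0 sl.length

-- _pick(sl, g): index of the pair with value nearest g, ties by smallest position
def pickIdx (sl : List (Int × Int)) (g : Int) : Int :=
  let j := bisectVal sl g
  if j = 0 then j
  else if j = (sl.length : Int) then bisectVal sl (PySem.List.pyGetD sl (j - 1) (0, 0)).1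
  else
    let k2 := bisectVal sl (PySem.List.pyGetD sl (j - 1) (0, 0)).1
    let dlo := g - (PySem.List.pyGetD sl k2 (0, 0)).1
    let dhi := (PySem.List.pyGetD sl j (0, 0)).1 - g
    if dlo < dhi ∨ (dlo = dhi ∧ (PySem.List.pyGetD sl k2 (0, 0)).2 < (PySem.List.pyGetD sl j (0, 0)).2)
    then k2 else j

def altLoop (sl : List (Int × Int)) (total : Int) : Int :=
  if 1 < sl.length then
    let g := PySem.Int.floordiv total 2
    let k := pickIdx sl g
    -- del sl[k]; the range guard only makes the recursion total (k is in range whenever reached)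
    if hk : 0 ≤ k ∧ k.toNat < sl.length then
      altLoop (sl.eraseIdx k.toNat) (total - (PySem.List.pyGetD sl k (0, 0)).1)
    else 0
  else (PySem.List.pyGetD sl 0 (0, 0)).1
termination_by sl.length
decreasing_by
  have h2 := hk.2
  simp only [List.length_eraseIdx]
  split <;> omega

def findVirus_alt (n : Int) (arr : List Int) : Int :=
  let sl := PySem.List.sorted ((PySem.List.enumerate arr 0).map (fun q => (q.2, q.1)))
      (fun q => q.1) false
  altLoop sl arr.sum

-- ===== PRECONDITION & SPEC =====
-- Pre_ excludes only the empty list, on which A raises IndexError (arr.pop on an empty list).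
def Pre_findVirus (n : Int) (arr : List Int) : Prop := arr ≠ []
instance (n : Int) (arr : List Int) : Decidable (Pre_findVirus n arr) := by
  unfold Pre_findVirus; infer_instance

def pvWitness_findVirus : Int × List Int := (0, [3, 1, 4, 1, 5])

def Spec_findVirus (n : Int) (arr : List Int) (out : Int) : Prop := out = findVirus_alt n arr
instance (n : Int) (arr : List Int) (out : Int) : Decidable (Spec_findVirus n arr out) := by
  unfold Spec_findVirus; infer_instance

-- ===== CLAIM (what is proved, stated in full; the proofs are below) =====
def Claim_equal_findVirus : Prop := ∀ (n : Int) (arr : List Int), Dom_findVirus n arr →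
  Pre_findVirus n arr → Spec_findVirus n arr (findVirus n arr)

-- ===== LEMMAS AND PROOFS =====

-- strict lexicographic order on (value, position) pairs (what Python's tuple '<' does here)
def lexLt (a b : Int × Int) : Prop := a.1 < b.1 ∨ (a.1 = b.1 ∧ a.2 < b.2)

-- the key A minimises: distance to g, ties by position
def dkey (g : Int) (q : Int × Int) : Int × Int := (|q.1 - g|, q.2)

theorem lexLt_asymm {a b : Int × Int} (h1 : lexLt a b) (h2 : lexLt b a) : False := by
  unfold lexLt at h1 h2; omega

-- (value, position) pairs of the input, as a zip
theorem enum_swap_eq_zip (l : List Int) (s : Int) :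
    (PySem.List.enumerate l s).map (fun q => (q.2, q.1)) =
      l.zip (PySem.List.pyRange s (s + l.length) 1) := by
  induction l generalizing s with
  | nil => simp [PySem.List.enumerate_nil]
  | cons x xs ih =>
    have hb : s < s + ((x :: xs).length : Int) := by push_cast [List.length_cons]; omega
    rw [PySem.List.enumerate_cons, PySem.List.pyRange_one_cons hb]
    simp only [List.map_cons, List.zip_cons_cons, ih (s + 1)]
    have h2 : s + ((x :: xs).length : Int) = (s + 1) + (xs.length : Int) := by
      push_cast [List.length_cons]; omega
    rw [h2]

-- stable insertion by value keeps the strict lex order when the new element's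
-- position is larger than every position already present
theorem insertBy_lexLt (x : Int × Int) :
    ∀ (acc : List (Int × Int)), acc.Pairwise lexLt → (∀ q ∈ acc, q.2 < x.2) →
    (PySem.List.insertBy (fun a b => decide (a.1 < b.1)) x acc).Pairwise lexLt := by
  intro acc
  induction acc with
  | nil => intro _ _; simp [PySem.List.insertBy, lexLt]
  | cons y ys ih =>
    intro hp hpos
    rw [List.pairwise_cons] at hp
    show (PySem.List.insertBy _ x (y :: ys)).Pairwise lexLt
    by_cases hxy : x.1 < y.1
    · rw [show PySem.List.insertBy (fun a b => decide (a.1 < b.1)) x (y :: ys)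
          = x :: y :: ys from by simp [PySem.List.insertBy, hxy]]
      refine List.pairwise_cons.2 ⟨?_, List.pairwise_cons.2 ⟨hp.1, hp.2⟩⟩
      intro z hz
      rcases List.mem_cons.1 hz with rfl | hz
      · exact Or.inl hxy
      · rcases hp.1 z hz with h | h
        · exact Or.inl (by omega)
        · exact Or.inl (by omega)
    · rw [show PySem.List.insertBy (fun a b => decide (a.1 < b.1)) x (y :: ys)
          = y :: PySem.List.insertBy (fun a b => decide (a.1 < b.1)) x ys from by
            simp [PySem.List.insertBy, hxy]]
      refine List.pairwise_cons.2 ⟨?_, ih hp.2 (fun q hq => hpos q (List.mem_cons_of_mem _ hq))⟩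
      intro z hz
      rcases (PySem.List.insertBy_mem_iff _ _ _ _).1 hz with rfl | hz
      · have := hpos y (List.mem_cons_self ..)
        unfold lexLt; omega
      · exact hp.1 z hz

-- sorting by value a list whose positions strictly increase gives a strictly
-- lex-sorted list
theorem sorted_fst_lexLt (pairs : List (Int × Int))
    (h : pairs.Pairwise (fun a b => a.2 < b.2)) :
    (PySem.List.sorted pairs (fun q => q.1) false).Pairwise lexLt := by
  rw [PySem.List.sorted_eq_foldl_insertBy]
  suffices H : ∀ (rest acc : List (Int × Int)), acc.Pairwise lexLt →
      rest.Pairwise (fun a b => a.2 < b.2) →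
      (∀ q ∈ acc, ∀ x ∈ rest, q.2 < x.2) →
      (rest.foldl (fun acc x => PySem.List.insertBy (fun a b => decide (a.1 < b.1)) x acc) acc).Pairwise lexLt by
    exact H pairs [] (by simp) h (by simp)
  intro rest
  induction rest with
  | nil => intro acc h1 _ _; simpa using h1
  | cons x rest ih =>
    intro acc h1 h2 h3
    rw [List.pairwise_cons] at h2
    simp only [List.foldl_cons]
    refine ih _ (insertBy_lexLt x acc h1 (fun q hq => h3 q hq x (List.mem_cons_self ..))) h2.2 ?_
    intro q hq x' hx'
    rcases (PySem.List.insertBy_mem_iff _ _ _ _).1 hq with rfl | hq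
    · exact h2.1 x' hx'
    · exact h3 q hq x' (List.mem_cons_of_mem _ hx')

-- boundary specification of the hand-rolled binary search (no sortedness needed)
theorem bisectLoop_boundary (sl : List (Int × Int)) (v : Int) :
    ∀ (lo hi : Int), lo ≤ hi →
      lo ≤ bisectLoop sl v lo hi ∧ bisectLoop sl v lo hi ≤ hi ∧
      (lo < bisectLoop sl v lo hi →
        (PySem.List.pyGetD sl (bisectLoop sl v lo hi - 1) (0, 0)).1 < v) ∧
      (bisectLoop sl v lo hi < hi →
        ¬ (PySem.List.pyGetD sl (bisectLoop sl v lo hi) (0, 0)).1 < v) := by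
  intro lo hi
  induction lo, hi using bisectLoop.induct sl v with
  | case1 lo hi hlt mid hcond ih =>
    intro _
    rw [show bisectLoop sl v lo hi = bisectLoop sl v (mid + 1) hi from by
      rw [bisectLoop, dif_pos hlt]; exact if_pos hcond]
    have h1 := PySem.Int.floordiv_two_mid_bounds (le_of_lt hlt)
    have h2 : mid < hi := (PySem.Int.floordiv_lt_iff_lt_mul (by omega)).2 (by omega)
    have ih' := ih (by omega)
    refine ⟨by omega, ih'.2.1, ?_, ih'.2.2.2⟩
    intro hgt
    rcases lt_or_ge (mid + 1) (bisectLoop sl v (mid + 1) hi) with h | h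
    · exact ih'.2.2.1 h
    · have : bisectLoop sl v (mid + 1) hi = mid + 1 := by omega
      rw [this]
      simpa using hcond
  | case2 lo hi hlt mid hcond ih =>
    intro _
    rw [show bisectLoop sl v lo hi = bisectLoop sl v lo mid from by
      rw [bisectLoop, dif_pos hlt]; exact if_neg hcond]
    have h1 := PySem.Int.floordiv_two_mid_bounds (le_of_lt hlt)
    have h2 : mid < hi := (PySem.Int.floordiv_lt_iff_lt_mul (by omega)).2 (by omega)
    have ih' := ih (by omega)
    refine ⟨ih'.1, by omega, ih'.2.2.1, ?_⟩
    intro hlt2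
    rcases lt_or_ge (bisectLoop sl v lo mid) mid with h | h
    · exact ih'.2.2.2 h
    · have : bisectLoop sl v lo mid = mid := by omega
      rw [this]
      simpa using hcond
  | case3 lo hi hlt =>
    intro hle
    rw [show bisectLoop sl v lo hi = lo from by rw [bisectLoop, dif_neg hlt]]
    exact ⟨le_refl _, hle, by omega, by omega⟩

-- monotone values along a (·.1 ≤ ·.1)-pairwise list
theorem fst_mono_of_pairwise {sl : List (Int × Int)} (h : sl.Pairwise lexLt)
    {i j : Nat} (hij : i ≤ j) (hj : j < sl.length) :
    (sl[i]'(by omega)).1 ≤ (sl[j]'hj).1 := by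
  rcases Nat.eq_or_lt_of_le hij with rfl | hlt
  · exact le_refl _
  · have := List.pairwise_iff_getElem.1 h i j (by omega) hj hlt
    unfold lexLt at this; omega

theorem snd_lt_of_pairwise {sl : List (Int × Int)} (h : sl.Pairwise lexLt)
    {i j : Nat} (hij : i < j) (hj : j < sl.length)
    (hfst : (sl[i]'(by omega)).1 = (sl[j]'hj).1) :
    (sl[i]'(by omega)).2 < (sl[j]'hj).2 := by
  have := List.pairwise_iff_getElem.1 h i j (by omega) hj hij
  unfold lexLt at this; omega

-- full characterisation of bisectVal on a lex-sorted list
theorem bisectVal_spec (sl : List (Int × Int)) (v : Int) (h : sl.Pairwise lexLt) :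
    ∃ r : Nat, bisectVal sl v = (r : Int) ∧ r ≤ sl.length ∧
      (∀ (i : Nat) (hi : i < sl.length), i < r → (sl[i]'hi).1 < v) ∧
      (∀ (i : Nat) (hi : i < sl.length), r ≤ i → v ≤ (sl[i]'hi).1) := by
  obtain ⟨h0, h1, h2, h3⟩ := bisectLoop_boundary sl v 0 sl.length (by positivity)
  set r0 := bisectLoop sl v 0 sl.length with hr0
  refine ⟨r0.toNat, by unfold bisectVal; omega, by omega, ?_, ?_⟩
  · intro i hi hir
    have hlt : 0 < r0 := by omega
    have hb := h2 hlt
    rw [PySem.List.pyGetD_eq_getElem sl (0,0) (by omega) (by omega)] at hb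
    have hmono := fst_mono_of_pairwise h (i := i) (j := (r0 - 1).toNat)
      (by omega) (by omega)
    omega
  · intro i hi hri
    have hlt : r0 < sl.length := by omega
    have hb := h3 hlt
    rw [PySem.List.pyGetD_eq_getElem sl (0,0) (by omega) (by omega)] at hb
    have hmono := fst_mono_of_pairwise h (i := r0.toNat) (j := i) (by omega) hi
    omega

-- A's summing loop is List.sum
theorem a_sum (l : List Int) :
    (PySem.List.pyRange 0 l.length 1).foldl (fun acc i => acc + PySem.List.pyGetD l i 0) 0
      = l.sum := by
  rw [PySem.List.foldl_pyRange_zero_pyGetD' l 0 (fun acc x => acc + x) 0]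
  rw [List.sum_eq_foldl]

-- A's nearest-index loop returns the first index of minimal |l[i] - g|
theorem a_fold_aux (l : List Int) (g : Int) : ∀ (m : Nat), 1 ≤ m → m ≤ l.length →
    ∃ i : Nat, i < m ∧
      (PySem.List.pyRange 0 (m : Int) 1).foldl
        (fun ni k =>
          if |PySem.List.pyGetD l k 0 - g| - |PySem.List.pyGetD l ni 0 - g| < 0 then k else ni) 0
      = (i : Int) ∧
      (∀ k : Nat, k < m → |l.getD i 0 - g| ≤ |l.getD k 0 - g|) ∧
      (∀ k : Nat, k < i → |l.getD i 0 - g| < |l.getD k 0 - g|) := by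
  intro m
  induction m with
  | zero => omega
  | succ m ih =>
    intro _ hml
    by_cases hm : m = 0
    · subst hm
      refine ⟨0, by omega, ?_, ?_, by omega⟩
      · rw [show ((1:Nat) : Int) = 0 + 1 from by omega,
          PySem.List.pyRange_one_succ_right (by omega),
          PySem.List.pyRange_one_eq_nil (by omega)]
        simp
      · intro k hk
        interval_cases k
        exact le_refl _
    · obtain ⟨i, hi, hfold, hle, hlt⟩ := ih (by omega) (by omega)
      rw [show ((m + 1 : Nat) : Int) = (m : Int) + 1 from by push_cast; ring,
        PySem.List.pyRange_one_succ_right (by positivity), List.foldl_append]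
      simp only [List.foldl_cons, List.foldl_nil, hfold]
      rw [PySem.List.pyGetD_natCast l m 0, PySem.List.pyGetD_natCast l i 0]
      by_cases hc : |l.getD m 0 - g| - |l.getD i 0 - g| < 0
      · rw [if_pos hc]
        refine ⟨m, by omega, rfl, ?_, ?_⟩
        · intro k hk
          rcases Nat.lt_succ_iff_lt_or_eq.1 hk with hk | rfl
          · have := hle k hk; omega
          · exact le_refl _
        · intro k hk
          have := hle k (by omega); omega
      · rw [if_neg hc]
        refine ⟨i, by omega, rfl, ?_, hlt⟩
        intro k hk
        rcases Nat.lt_succ_iff_lt_or_eq.1 hk with hk | rfl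
        · exact hle k hk
        · omega

theorem a_fold_spec (l : List Int) (g : Int) (hne : l ≠ []) :
    ∃ (i : Nat) (hi : i < l.length), (PySem.List.pyRange 0 l.length 1).foldl
        (fun ni k =>
          if |PySem.List.pyGetD l k 0 - g| - |PySem.List.pyGetD l ni 0 - g| < 0 then k else ni) 0
      = (i : Int) ∧
      (∀ (k : Nat) (hk : k < l.length), |(l[i]'hi) - g| ≤ |(l[k]'hk) - g|) ∧
      (∀ (k : Nat) (hk : k < l.length), k < i → |(l[i]'hi) - g| < |(l[k]'hk) - g|) := by
  obtain ⟨i, hi, hfold, hle, hlt⟩ := a_fold_aux l g l.length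
    (by cases l with | nil => exact absurd rfl hne | cons => simp) le_rfl
  refine ⟨i, hi, hfold, ?_, ?_⟩
  · intro k hk
    have := hle k hk
    rwa [List.getD_eq_getElem _ _ hi, List.getD_eq_getElem _ _ hk] at this
  · intro k hk hki
    have := hlt k hki
    rwa [List.getD_eq_getElem _ _ hi, List.getD_eq_getElem _ _ hk] at this

theorem lexLt_trans {a b c : Int × Int} (h1 : lexLt a b) (h2 : lexLt b c) : lexLt a c := by
  unfold lexLt at *; omega

theorem snd_ne_of_nodup {sl : List (Int × Int)} (hsnd : (sl.map (·.2)).Nodup)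
    {i j : Nat} (hi : i < sl.length) (hj : j < sl.length) (hij : i ≠ j) :
    (sl[i]'hi).2 ≠ (sl[j]'hj).2 := by
  intro hcontra
  have h1 : (sl.map (·.2))[i]'(by simpa using hi) = (sl.map (·.2))[j]'(by simpa using hj) := by
    simpa using hcontra
  exact hij ((hsnd.getElem_inj_iff).1 h1)

-- every element on the ≥ g side of the list is lex-beaten (under dkey) by the first one
theorem hi_side_min {sl : List (Int × Int)} (g : Int) (hsort : sl.Pairwise lexLt)
    {jn : Nat} (hjn : jn < sl.length)
    (hjhi : ∀ (i : Nat) (hi : i < sl.length), jn ≤ i → g ≤ (sl[i]'hi).1) :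
    ∀ (i : Nat) (hi : i < sl.length), jn < i →
      lexLt (dkey g (sl[jn]'hjn)) (dkey g (sl[i]'hi)) := by
  intro i hi hji
  have h1 := hjhi jn hjn le_rfl
  have h2 := hjhi i hi (by omega)
  have h3 := fst_mono_of_pairwise hsort (i := jn) (j := i) (by omega) hi
  rcases eq_or_lt_of_le h3 with heq | hlt
  · have h4 := snd_lt_of_pairwise hsort (i := jn) (j := i) hji hi heq
    exact Or.inr ⟨by unfold dkey; rw [heq], h4⟩
  · refine Or.inl ?_
    show |(sl[jn]'hjn).1 - g| < |(sl[i]'hi).1 - g|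
    rw [abs_of_nonneg (by omega), abs_of_nonneg (by omega)]
    omega

-- every element strictly below g is lex-beaten (under dkey) by the first element
-- carrying the largest value below g
theorem lo_side_min {sl : List (Int × Int)} (g : Int) (hsort : sl.Pairwise lexLt)
    {jn k2n : Nat} (hjn0 : 0 < jn) (hjnle : jn ≤ sl.length) (hk2le : k2n ≤ jn - 1)
    (hjlo : ∀ (i : Nat) (hi : i < sl.length), i < jn → (sl[i]'hi).1 < g)
    (hk2hi : ∀ (i : Nat) (hi : i < sl.length), k2n ≤ i →
      (sl[jn-1]'(by omega)).1 ≤ (sl[i]'hi).1)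
    (hk2lo : ∀ (i : Nat) (hi : i < sl.length), i < k2n →
      (sl[i]'hi).1 < (sl[jn-1]'(by omega)).1) :
    (sl[k2n]'(by omega)).1 = (sl[jn-1]'(by omega)).1 ∧
    ∀ (i : Nat) (hi : i < sl.length), i < jn → i ≠ k2n →
      lexLt (dkey g (sl[k2n]'(by omega))) (dkey g (sl[i]'hi)) := by
  have hk2len : k2n < sl.length := by omega
  have hfst : (sl[k2n]'hk2len).1 = (sl[jn-1]'(by omega)).1 := by
    have h1 := fst_mono_of_pairwise hsort (i := k2n) (j := jn - 1) hk2le (by omega)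
    have h2 := hk2hi k2n hk2len le_rfl
    omega
  refine ⟨hfst, ?_⟩
  intro i hi hijn hik
  have hvk : (sl[k2n]'hk2len).1 < g := by
    have := hjlo (jn-1) (by omega) (by omega); omega
  have hvi : (sl[i]'hi).1 < g := hjlo i hi hijn
  rcases Nat.lt_or_ge i k2n with hlt | hge
  · refine Or.inl ?_
    show |(sl[k2n]'hk2len).1 - g| < |(sl[i]'hi).1 - g|
    have := hk2lo i hi hlt
    rw [abs_of_neg (by omega), abs_of_neg (by omega)]
    omega
  · have hik' : k2n < i := by omega
    have heq : (sl[k2n]'hk2len).1 = (sl[i]'hi).1 := by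
      have h1 := hk2hi i hi hge
      have h2 := fst_mono_of_pairwise hsort (i := i) (j := jn - 1) (by omega) (by omega)
      omega
    have h4 := snd_lt_of_pairwise hsort (i := k2n) (j := i) hik' hi heq
    exact Or.inr ⟨by unfold dkey; rw [heq], h4⟩

-- B's pick returns the index of the strict lex-minimum of dkey g over sl
theorem pickIdx_spec (sl : List (Int × Int)) (g : Int)
    (hsort : sl.Pairwise lexLt) (hsnd : (sl.map (·.2)).Nodup) (hlen : 1 < sl.length) :
    ∃ (k : Nat) (hk : k < sl.length), pickIdx sl g = (k : Int) ∧
      ∀ q ∈ sl, q ≠ sl[k]'hk → lexLt (dkey g (sl[k]'hk)) (dkey g q) := by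
  obtain ⟨jn, hjeq, hjle, hjlo, hjhi⟩ := bisectVal_spec sl g hsort
  by_cases hj0 : jn = 0
  · -- no element below g: the first element is nearest
    subst hj0
    have hpick : pickIdx sl g = ((0 : Nat) : Int) := by
      unfold pickIdx
      rw [hjeq]
      simp
    refine ⟨0, by omega, hpick, ?_⟩
    intro q hq hne
    obtain ⟨i, hi, rfl⟩ := List.mem_iff_getElem.1 hq
    have hi0 : 0 < i := by
      rcases Nat.eq_zero_or_pos i with rfl | h
      · exact absurd rfl hne
      · exact h
    exact hi_side_min g hsort (by omega) hjhi i hi hi0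
  · have hvlo : (PySem.List.pyGetD sl ((jn : Int) - 1) (0, 0)).1 = (sl[jn-1]'(by omega)).1 := by
      rw [PySem.List.pyGetD_eq_getElem sl (0,0) (by omega) (by omega)]
      congr 2
      omega
    obtain ⟨k2n, hk2eq, hk2le', hk2lo, hk2hi⟩ :=
      bisectVal_spec sl ((sl[jn-1]'(by omega)).1) hsort
    have hk2le : k2n ≤ jn - 1 := by
      by_contra hcon
      exact absurd (hk2lo (jn-1) (by omega) (by omega)) (lt_irrefl _)
    obtain ⟨hfst, hlo⟩ := lo_side_min g hsort (jn := jn) (k2n := k2n)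
      (by omega) (by omega) hk2le hjlo hk2hi hk2lo
    have hc1 : ((jn : Nat) : Int) ≠ 0 := by omega
    by_cases hjlen : jn = sl.length
    · -- everything is below g: the first element carrying the largest value is nearest
      have hpick : pickIdx sl g = ((k2n : Nat) : Int) := by
        unfold pickIdx
        rw [hjeq, if_neg hc1, if_pos (by rw [hjlen]), hvlo, hk2eq]
      refine ⟨k2n, by omega, hpick, ?_⟩
      intro q hq hne
      obtain ⟨i, hi, rfl⟩ := List.mem_iff_getElem.1 hq
      have hik : i ≠ k2n := by
        intro h; subst h; exact absurd rfl hne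
      exact hlo i hi (by omega) hik
    · -- elements on both sides of g: compare the two boundary candidates
      have hjnlt : jn < sl.length := by omega
      have hk2len : k2n < sl.length := by omega
      have hvk2 : PySem.List.pyGetD sl ((k2n : Nat) : Int) (0, 0) = sl[k2n]'hk2len := by
        rw [PySem.List.pyGetD_natCast, List.getD_eq_getElem _ _ hk2len]
      have hvj : PySem.List.pyGetD sl ((jn : Nat) : Int) (0, 0) = sl[jn]'hjnlt := by
        rw [PySem.List.pyGetD_natCast, List.getD_eq_getElem _ _ hjnlt]
      have hc2 : ((jn : Nat) : Int) ≠ (sl.length : Int) := by omega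
      have hmlv : (sl[k2n]'hk2len).1 < g := by
        have := hjlo (jn-1) (by omega) (by omega); omega
      have hmhv : g ≤ (sl[jn]'hjnlt).1 := hjhi jn hjnlt le_rfl
      have habs_lo : |(sl[k2n]'hk2len).1 - g| = g - (sl[k2n]'hk2len).1 := by
        rw [abs_of_neg (by omega)]; omega
      have habs_hi : |(sl[jn]'hjnlt).1 - g| = (sl[jn]'hjnlt).1 - g := by
        rw [abs_of_nonneg (by omega)]
      have hcond_iff :
          (g - (sl[k2n]'hk2len).1 < (sl[jn]'hjnlt).1 - g ∨
            (g - (sl[k2n]'hk2len).1 = (sl[jn]'hjnlt).1 - g ∧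
              (sl[k2n]'hk2len).2 < (sl[jn]'hjnlt).2)) ↔
          lexLt (dkey g (sl[k2n]'hk2len)) (dkey g (sl[jn]'hjnlt)) := by
        unfold lexLt dkey
        rw [habs_lo, habs_hi]
      by_cases hc : g - (sl[k2n]'hk2len).1 < (sl[jn]'hjnlt).1 - g ∨
          (g - (sl[k2n]'hk2len).1 = (sl[jn]'hjnlt).1 - g ∧
            (sl[k2n]'hk2len).2 < (sl[jn]'hjnlt).2)
      · have hpick : pickIdx sl g = ((k2n : Nat) : Int) := by
          unfold pickIdx
          rw [hjeq, if_neg hc1, if_neg hc2, hvlo, hk2eq]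
          simp only [hvk2, hvj]
          exact if_pos hc
        refine ⟨k2n, hk2len, hpick, ?_⟩
        intro q hq hne
        obtain ⟨i, hi, rfl⟩ := List.mem_iff_getElem.1 hq
        have hik : i ≠ k2n := by
          intro h; subst h; exact absurd rfl hne
        rcases Nat.lt_or_ge i jn with hij | hij
        · exact hlo i hi hij hik
        · rcases Nat.eq_or_lt_of_le hij with rfl | hij'
          · exact hcond_iff.1 hc
          · exact lexLt_trans (hcond_iff.1 hc) (hi_side_min g hsort hjnlt hjhi i hi hij')
      · have hpick : pickIdx sl g = ((jn : Nat) : Int) := by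
          unfold pickIdx
          rw [hjeq, if_neg hc1, if_neg hc2, hvlo, hk2eq]
          simp only [hvk2, hvj]
          exact if_neg hc
        have hsne : (sl[k2n]'hk2len).2 ≠ (sl[jn]'hjnlt).2 :=
          snd_ne_of_nodup hsnd hk2len hjnlt (by omega)
        have hmh_lt_ml : lexLt (dkey g (sl[jn]'hjnlt)) (dkey g (sl[k2n]'hk2len)) := by
          unfold lexLt dkey
          rw [habs_lo, habs_hi]
          omega
        refine ⟨jn, hjnlt, hpick, ?_⟩
        intro q hq hne
        obtain ⟨i, hi, rfl⟩ := List.mem_iff_getElem.1 hq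
        have hij : i ≠ jn := by
          intro h; subst h; exact absurd rfl hne
        rcases Nat.lt_or_ge i jn with hlt | hge
        · by_cases hik : i = k2n
          · subst hik; exact hmh_lt_ml
          · exact lexLt_trans hmh_lt_ml (hlo i hi hlt hik)
        · exact hi_side_min g hsort hjnlt hjhi i hi (by omega)

-- list facts used for the alignment
theorem zip_eraseIdx {α β : Type} (l : List α) (ps : List β) (i : Nat) :
    (l.eraseIdx i).zip (ps.eraseIdx i) = (l.zip ps).eraseIdx i := by
  induction l generalizing ps i with
  | nil => simp
  | cons x xs ih =>
    cases ps with
    | nil => simp [List.eraseIdx]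
    | cons p ps =>
      cases i with
      | zero => simp [List.eraseIdx]
      | succ i => simp [List.eraseIdx, ih]

theorem sum_eraseIdx (l : List Int) (i : Nat) (hi : i < l.length) :
    (l.eraseIdx i).sum = l.sum - (l[i]'hi) := by
  induction l generalizing i with
  | nil => simp at hi
  | cons x xs ih =>
    cases i with
    | zero => simp [List.eraseIdx]
    | succ i =>
      simp only [List.eraseIdx, List.sum_cons, List.getElem_cons_succ]
      rw [ih i (by simpa using hi)]
      ring

-- the main alignment: B's loop over the sorted pair list computes A's loop result
theorem main_align : ∀ (N : Nat) (l : List Int) (sl : List (Int × Int)) (ps : List Int),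
    l.length ≤ N → l ≠ [] → sl.Pairwise lexLt → sl.Perm (l.zip ps) →
    ps.Pairwise (· < ·) → ps.length = l.length →
    altLoop sl l.sum = PySem.List.pyGetD (findVirusLoop l) 0 0 := by
  intro N
  induction N with
  | zero =>
    intro l _ _ hN hne _ _ _
    cases l with
    | nil => exact absurd rfl hne
    | cons x xs => simp at hN
  | succ N ih =>
    intro l sl ps hN hne hsort hperm hps hlen
    have hzlen : (l.zip ps).length = l.length := by
      rw [List.length_zip]; omega
    have hlsl : sl.length = l.length := by
      rw [hperm.length_eq, hzlen]
    have hl0 : 0 < l.length := List.length_pos_of_ne_nil hne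
    by_cases hone : l.length = 1
    · -- one element left: both sides return it
      cases l with
      | nil => exact absurd rfl hne
      | cons x xs =>
        have hxs : xs = [] := by
          simpa using List.length_eq_zero_iff.1 (by simpa using hone)
        subst hxs
        cases ps with
        | nil => simp at hlen
        | cons p ps' =>
          have hps' : ps' = [] := by
            simpa using List.length_eq_zero_iff.1 (by simpa using hlen.symm)
          subst hps'
          have hsl : sl = [(x, p)] := List.perm_singleton.1 (by simpa using hperm)
          subst hsl
          rw [show findVirusLoop [x] = [x] from by rw [findVirusLoop]; simp]
          rw [altLoop]
          simp [PySem.List.pyGetD_zero_cons]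
    · have hlen2 : 1 < l.length := by omega
      have hsnd : (sl.map (·.2)).Nodup := by
        have h1 : (sl.map (·.2)).Perm ((l.zip ps).map (·.2)) := hperm.map _
        have h2 : (l.zip ps).map (·.2) = ps := by
          have := List.map_snd_zip (l₁ := l) (l₂ := ps) (by omega)
          simpa using this
        rw [h1.nodup_iff, h2]
        exact hps.nodup
      have hznodup : (l.zip ps).Nodup := by
        apply List.Nodup.of_map (fun q => q.2)
        have h2 : (l.zip ps).map (·.2) = ps := by
          have := List.map_snd_zip (l₁ := l) (l₂ := ps) (by omega)
          simpa using this
        rw [h2]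
        exact hps.nodup
      have hslnodup : sl.Nodup := hperm.nodup_iff.2 hznodup
      set g := PySem.Int.floordiv l.sum 2 with hg
      obtain ⟨i, hi, hfold, hmin, hfirst⟩ := a_fold_spec l g hne
      obtain ⟨k, hk, hpickeq, hmin'⟩ := pickIdx_spec sl g hsort hsnd (by omega)
      have hpsi : i < ps.length := by omega
      have hzipi : (l.zip ps)[i]'(by omega) = ((l[i]'hi), (ps[i]'hpsi)) :=
        List.getElem_zip
      -- A's chosen pair is the strict lex-minimum of dkey over the zip
      have hqmin : ∀ q ∈ l.zip ps, q ≠ (l.zip ps)[i]'(by omega) →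
          lexLt (dkey g ((l.zip ps)[i]'(by omega))) (dkey g q) := by
        intro q hq hneq
        obtain ⟨t, ht, rfl⟩ := List.mem_iff_getElem.1 hq
        have hti : t ≠ i := by
          intro h; subst h; exact absurd rfl hneq
        have htl : t < l.length := by omega
        have htp : t < ps.length := by omega
        have hzipt : (l.zip ps)[t]'ht = ((l[t]'htl), (ps[t]'htp)) := List.getElem_zip
        rw [hzipt, hzipi]
        unfold dkey lexLt
        simp only
        rcases Nat.lt_or_ge t i with hlt | hge
        · exact Or.inl (hfirst t htl hlt)
        · have hit : i < t := by omega
          rcases lt_or_eq_of_le (hmin t htl) with hlt2 | heq2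
          · exact Or.inl hlt2
          · refine Or.inr ⟨heq2, ?_⟩
            exact List.pairwise_iff_getElem.1 hps i t hpsi htp hit
      -- hence B removes exactly the element A removes
      have hm_eq : sl[k]'hk = (l.zip ps)[i]'(by omega) := by
        by_contra hneq
        have hmem1 : (sl[k]'hk) ∈ l.zip ps := hperm.subset (List.getElem_mem hk)
        have hmem2 : ((l.zip ps)[i]'(by omega)) ∈ sl :=
          hperm.symm.subset (List.getElem_mem (by omega))
        exact lexLt_asymm (hmin' _ hmem2 (fun h => hneq h.symm)) (hqmin _ hmem1 hneq)
      have hmfst : (sl[k]'hk).1 = l[i]'hi := by rw [hm_eq, hzipi]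
      -- one unfolding of A's loop
      have hA : PySem.List.pyGetD (findVirusLoop l) 0 0
          = PySem.List.pyGetD (findVirusLoop (l.eraseIdx i)) 0 0 := by
        have : findVirusLoop l = findVirusLoop (l.eraseIdx i) := by
          rw [findVirusLoop, if_pos (by omega : l.length ≠ 1)]
          simp only [a_sum l, hfold]
          split
          · rename_i r heq
            simp only [a_sum l, ← hg] at heq
            rw [hfold, PySem.List.pop?_natCast l i hi] at heq
            simp only [Option.some.injEq] at heq
            rw [← heq]
          · rename_i heq
            simp only [a_sum l, ← hg] at heq
            rw [hfold, PySem.List.pop?_natCast l i hi] at heq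
            simp at heq
        rw [this]
      -- one unfolding of B's loop
      have hB : altLoop sl l.sum
          = altLoop (sl.eraseIdx k) (l.sum - (sl[k]'hk).1) := by
        rw [altLoop, if_pos (by omega)]
        simp only [← hg, hpickeq]
        rw [dif_pos (by constructor <;> simp <;> omega)]
        congr 1
        all_goals simp [List.getElem?_eq_getElem hk]
      rw [hA, hB, hmfst, ← sum_eraseIdx l i hi]
      -- the invariants survive one removal
      apply ih (l.eraseIdx i) (sl.eraseIdx k) (ps.eraseIdx i)
      · rw [List.length_eraseIdx]; split <;> omega
      · apply List.ne_nil_of_length_pos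
        rw [List.length_eraseIdx, if_pos hi]; omega
      · exact List.Pairwise.sublist (List.eraseIdx_sublist sl k) hsort
      · rw [zip_eraseIdx,
          ← List.Nodup.erase_getElem hslnodup k hk,
          ← List.Nodup.erase_getElem hznodup i (by omega)]
        rw [hm_eq]
        exact hperm.erase _
      · exact List.Pairwise.sublist (List.eraseIdx_sublist ps i) hps
      · rw [List.length_eraseIdx, if_pos hpsi, List.length_eraseIdx, if_pos hi]
        omega

-- ===== VERDICT (by name: the statement is the Claim_ definition above) =====
theorem findVirus_spec : Claim_equal_findVirus := by
  intro n arr _ hpre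
  unfold Spec_findVirus findVirus findVirus_alt
  have hpairs : (PySem.List.enumerate arr 0).map (fun q => (q.2, q.1))
      = arr.zip (PySem.List.pyRange 0 arr.length 1) := by
    have h := enum_swap_eq_zip arr 0
    rw [h, zero_add]
  have hlenps : (PySem.List.pyRange 0 (arr.length : Int) 1).length = arr.length := by
    rw [PySem.List.length_pyRange_one]; omega
  have hsnd2 : ((PySem.List.enumerate arr 0).map (fun q => (q.2, q.1))).Pairwise
      (fun a b => a.2 < b.2) := by
    rw [hpairs, List.pairwise_iff_getElem]
    intro a b ha hb hab
    rw [List.getElem_zip, List.getElem_zip]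
    exact List.pairwise_iff_getElem.1 (PySem.List.pairwise_lt_pyRange_one 0 (arr.length : Int))
      a b (by simp_all [List.length_zip]) (by simp_all [List.length_zip]) hab
  refine (main_align arr.length arr _ (PySem.List.pyRange 0 (arr.length : Int) 1)
    le_rfl hpre (sorted_fst_lexLt _ hsnd2) ?_
    (PySem.List.pairwise_lt_pyRange_one 0 (arr.length : Int)) hlenps).symm
  rw [← hpairs]
  exact PySem.List.sorted_perm _ _ _
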